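-- pv_equiv track=rewrite | github.com/the-omega-institute/automath | theory/2026_golden_ratio_driven_scan_projection_generation_recursive_emergence/scripts/exp_fibonacci_cube_fvector_audit.py | C_closed
-- ===== SOURCE A (Python) =====
-- from math import comb
--
-- def _kmax_for_n(n: int) -> int:
--     # Maximum number of independently flippable 1-bits is the maximum independent set size
--     # in P_n, i.e. ceil(n/2).
--     return (n + 1) // 2
--
-- def C_closed(n: int, k: int) -> int:
--     """Closed-form coefficient formula for C(n,k)."""
--     n = int(n)
--     k = int(k)
--     if n < 0 or k < 0:
--         return 0
--     # For Γ_n, the largest cube dimension is ceil(n/2).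
--     if k > _kmax_for_n(n):
--         return 0
--     out = 0
--     # Note: the summation upper limit is ceil(n/2) = floor((n+1)/2).
--     for j in range(k, ((n + 1) // 2) + 1):
--         out += comb(n - j + 1, j) * comb(j, k)
--     return int(out)
-- ===== SOURCE B (Python) =====
-- def C_closed(n: int, k: int) -> int:
--     """Fibonacci-cube f-vector via the recurrence f(n,k)=f(n-1,k)+f(n-2,k)+f(n-2,k-1),
--     computed by a bottom-up two-row DP instead of the binomial summation."""
--     n = int(n)
--     k = int(k)
--     if n < 0 or k < 0:
--         return 0
--     if 2 * k > n + 1: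
--         # the cube dimension never exceeds ceil(n/2), so the whole column is zero
--         return 0
--     prev2, prev = [], []
--     row = []
--     for i in range(n + 1):
--         if i == 0:
--             row = [1] + [0] * k
--         elif i == 1:
--             row = [2] + ([1] if k >= 1 else []) + [0] * (k - 1)
--         else:
--             row = [prev[j] + prev2[j] + (prev2[j - 1] if j > 0 else 0)
--                    for j in range(k + 1)]
--         prev2, prev = prev, row
--     return row[k]
-- ===== Notes on version B (the rewrite author's own statement) =====
-- stated objective: alternative
-- what changed: Replaces A's single loop summing comb(n-j+1,j)*comb(j,k) by a bottom-up dynamic program over the Fibonacci-cube f-vector recurrence f(i,j)=f(i-1,j)+f(i-2,j)+f(i-2,j-1) with base rows i=0,1, keeping the same negative-input guards.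
import Mathlib
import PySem

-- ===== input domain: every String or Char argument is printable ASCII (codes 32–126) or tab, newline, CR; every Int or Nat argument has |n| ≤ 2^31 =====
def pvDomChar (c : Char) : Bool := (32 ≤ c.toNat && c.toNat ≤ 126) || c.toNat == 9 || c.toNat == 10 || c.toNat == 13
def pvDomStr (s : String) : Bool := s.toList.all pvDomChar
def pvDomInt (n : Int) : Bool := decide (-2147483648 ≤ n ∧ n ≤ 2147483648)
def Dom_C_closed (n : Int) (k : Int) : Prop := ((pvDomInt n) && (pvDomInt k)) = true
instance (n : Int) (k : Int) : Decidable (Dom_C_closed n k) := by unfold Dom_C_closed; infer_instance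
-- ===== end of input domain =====

-- B replaces A's binomial summation by a bottom-up DP over the Fibonacci-cube
-- f-vector recurrence f(n,k)=f(n-1,k)+f(n-2,k)+f(n-2,k-1) (alternative algorithm, not claimed faster).

-- ===== PORT A =====
-- math.comb for the nonnegative arguments reached by A's loop (there 0 ≤ a, 0 ≤ b,
-- where Nat.choose is exactly comb, including comb(a,b)=0 for b>a; comb raises only
-- on negative arguments, which A's loop never produces).
def pyComb (a : Int) (b : Int) : Int := (a.toNat.choose b.toNat : Int)

def C_closed (n : Int) (k : Int) : Int :=
  if n < 0 ∨ k < 0 then 0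
  else if k > PySem.Int.floordiv (n + 1) 2 then 0
  else
    (PySem.List.pyRange k (PySem.Int.floordiv (n + 1) 2 + 1) 1).foldl
      (fun out j => out + pyComb (n - j + 1) j * pyComb j k) 0

-- ===== PORT B =====
-- row for i = 0 : [1] + [0]*k
def fvRow0 (K : Nat) : List Int := 1 :: List.replicate K 0
-- row for i = 1 : [2] + ([1] if k>=1 else []) + [0]*(k-1)
def fvRow1 (K : Nat) : List Int := [2] ++ (if 1 ≤ K then [1] else []) ++ List.replicate (K - 1) 0
-- the comprehension [prev[j] + prev2[j] + (prev2[j-1] if j>0 else 0) for j in range(k+1)]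
-- (getD is exact here: the Python indices are always in range of the length-(k+1) rows)
def fvNextRow (prev2 : List Int) (prev : List Int) (K : Nat) : List Int :=
  (List.range (K + 1)).map
    (fun j => prev.getD j 0 + prev2.getD j 0 + (if 0 < j then prev2.getD (j - 1) 0 else 0))

def C_closed_alt (n : Int) (k : Int) : Int :=
  if n < 0 ∨ k < 0 then 0
  else if 2 * k > n + 1 then 0
  else
    let K := k.toNat
    let st := (List.range (n.toNat + 1)).foldl
      (fun (st : List Int × List Int) i =>
        let row := if i = 0 then fvRow0 K
                   else if i = 1 then fvRow1 K
                   else fvNextRow st.1 st.2 K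
        (st.2, row)) ([], [])
    st.2.getD K 0

-- ===== PRECONDITION & SPEC =====
def Spec_C_closed (n : Int) (k : Int) (out : Int) : Prop := out = C_closed_alt n k
instance (n : Int) (k : Int) (out : Int) : Decidable (Spec_C_closed n k out) := by unfold Spec_C_closed; infer_instance

-- ===== CLAIM (what is proved, stated in full; the proofs are below) =====
def Claim_equal_C_closed : Prop := ∀ (n : Int) (k : Int), Dom_C_closed n k → Spec_C_closed n k (C_closed n k)

-- ===== LEMMAS AND PROOFS =====

-- A's summand, as a Nat sum over j < n+2 (the extra terms are 0).
def gsum (n : Nat) (k : Nat) : Nat :=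
  ∑ j ∈ Finset.range (n + 2), (n + 1 - j).choose j * j.choose k

-- the Fibonacci-cube f-vector recurrence, B's mathematical content
def fvec : Nat → Nat → Nat
  | 0, k => if k = 0 then 1 else 0
  | 1, k => if k = 0 then 2 else if k = 1 then 1 else 0
  | n + 2, k => fvec (n + 1) k + fvec n k + (if k = 0 then 0 else fvec n (k - 1))

theorem gsum_zero (k : Nat) : gsum 0 k = if k = 0 then 1 else 0 := by
  simp [gsum, Finset.sum_range_succ]
  cases k <;> simp

theorem gsum_one (k : Nat) : gsum 1 k = if k = 0 then 2 else if k = 1 then 1 else 0 := by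
  simp [gsum, Finset.sum_range_succ]
  match k with
  | 0 => simp
  | 1 => simp
  | (k+2) => simp [Nat.choose_eq_zero_of_lt]

theorem list_sum_range_cast (f : Nat → Nat) (n : Nat) :
    ((List.range n).map (fun i => ((f i : Nat) : Int))).sum
    = ((∑ i ∈ Finset.range n, f i : Nat) : Int) := by
  induction n with
  | zero => simp
  | succ n ih => rw [List.range_succ, Finset.sum_range_succ]; simp [ih]

theorem gsum_rec (n : Nat) (k : Nat) :
    gsum (n + 2) k = gsum (n + 1) k + gsum n k + (if k = 0 then 0 else gsum n (k - 1)) := by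
  have e1 : gsum (n + 2) k
      = (∑ i ∈ Finset.range (n + 3), (n + 2 - i).choose (i + 1) * (i + 1).choose k)
        + Nat.choose 0 k := by
    unfold gsum
    rw [Finset.sum_range_succ']
    congr 1
    · apply Finset.sum_congr rfl
      intro i _
      congr 2
      omega
    · simp
  have e2 : (∑ i ∈ Finset.range (n + 3), (n + 2 - i).choose (i + 1) * (i + 1).choose k)
      = ∑ i ∈ Finset.range (n + 2), (n + 2 - i).choose (i + 1) * (i + 1).choose k := by
    rw [Finset.sum_range_succ]
    have : n + 2 - (n + 2) = 0 := by omega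
    rw [this]
    simp [Nat.choose_eq_zero_of_lt]
  have e3 : (∑ i ∈ Finset.range (n + 2), (n + 2 - i).choose (i + 1) * (i + 1).choose k)
      = (∑ i ∈ Finset.range (n + 2), (n + 1 - i).choose i * (i + 1).choose k)
        + ∑ i ∈ Finset.range (n + 2), (n + 1 - i).choose (i + 1) * (i + 1).choose k := by
    rw [← Finset.sum_add_distrib]
    apply Finset.sum_congr rfl
    intro i hi
    simp only [Finset.mem_range] at hi
    have h1 : n + 2 - i = (n + 1 - i) + 1 := by omega
    rw [h1, Nat.choose_succ_succ, Nat.add_mul]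
  have eB : gsum (n + 1) k
      = (∑ i ∈ Finset.range (n + 2), (n + 1 - i).choose (i + 1) * (i + 1).choose k)
        + Nat.choose 0 k := by
    unfold gsum
    rw [Finset.sum_range_succ']
    congr 1
    · apply Finset.sum_congr rfl
      intro i _
      congr 2
      omega
    · simp
  have eA : (∑ i ∈ Finset.range (n + 2), (n + 1 - i).choose i * (i + 1).choose k)
      = gsum n k + (if k = 0 then 0 else gsum n (k - 1)) := by
    cases k with
    | zero => simp [gsum]
    | succ k' =>
      simp only [Nat.succ_ne_zero, Nat.add_sub_cancel, reduceIte]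
      have : ∀ i ∈ Finset.range (n + 2),
          (n + 1 - i).choose i * (i + 1).choose (k' + 1)
          = (n + 1 - i).choose i * i.choose (k' + 1) + (n + 1 - i).choose i * i.choose k' := by
        intro i _
        rw [Nat.choose_succ_succ, Nat.mul_add]
        simp only [Nat.succ_eq_add_one]
        omega
      rw [Finset.sum_congr rfl this, Finset.sum_add_distrib]
      rfl
  rw [e1, e2, e3, eB, eA]
  omega

theorem fvec_eq_gsum (n : Nat) : ∀ k, fvec n k = gsum n k := by
  induction n using Nat.strong_induction_on with
  | _ n ih =>
    match n with
    | 0 => intro k; rw [gsum_zero]; rfl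
    | 1 => intro k; rw [gsum_one]; rfl
    | (n+2) =>
      intro k
      rw [show fvec (n+2) k = fvec (n+1) k + fvec n k + (if k = 0 then 0 else fvec n (k-1)) from rfl,
        gsum_rec, ih (n+1) (by omega) k, ih n (by omega) k]
      cases k with
      | zero => simp
      | succ k' => simp [ih n (by omega) k']

-- the j-th entry of B's i-th row is fvec i j
def rowOf (i : Nat) (K : Nat) : List Int :=
  (List.range (K + 1)).map (fun j => (fvec i j : Int))

theorem rowOf_getD (i : Nat) (K : Nat) (j : Nat) (hj : j ≤ K) :
    (rowOf i K).getD j 0 = (fvec i j : Int) := by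
  simp [rowOf, List.getD_eq_getElem?_getD, Nat.lt_succ_of_le hj]

theorem fvRow0_eq (K : Nat) : fvRow0 K = rowOf 0 K := by
  simp [fvRow0, rowOf, List.range_succ_eq_map, List.map_map, fvec, Function.comp_def,
    List.map_const']

theorem fvRow1_eq (K : Nat) : fvRow1 K = rowOf 1 K := by
  match K with
  | 0 => rfl
  | (K' + 1) =>
    simp [fvRow1, rowOf, List.range_succ_eq_map, List.map_map, fvec, Function.comp_def,
      List.map_const']

theorem fvNextRow_eq (i : Nat) (K : Nat) :
    fvNextRow (rowOf i K) (rowOf (i + 1) K) K = rowOf (i + 2) K := by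
  apply List.map_congr_left
  intro j hj
  have hj' : j ≤ K := by simpa [Nat.lt_succ_iff] using hj
  have hj1 : j - 1 ≤ K := by omega
  rw [rowOf_getD _ _ _ hj', rowOf_getD _ _ _ hj']
  rw [show fvec (i+2) j = fvec (i+1) j + fvec i j + (if j = 0 then 0 else fvec i (j-1)) from rfl]
  cases j with
  | zero => simp
  | succ j' =>
    rw [rowOf_getD _ _ _ hj1]
    simp only [Nat.succ_ne_zero, reduceIte, Nat.add_sub_cancel, Nat.zero_lt_succ, if_pos]
    push_cast
    ring

theorem foldl_rows (K : Nat) (m : Nat) :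
    (List.range (m + 1)).foldl
      (fun (st : List Int × List Int) i =>
        let row := if i = 0 then fvRow0 K
                   else if i = 1 then fvRow1 K
                   else fvNextRow st.1 st.2 K
        (st.2, row)) ([], []) =
    ((if m = 0 then [] else rowOf (m - 1) K), rowOf m K) := by
  induction m with
  | zero => simp [fvRow0_eq]
  | succ m ihm =>
    rw [List.range_succ, List.foldl_append, ihm]
    match m with
    | 0 => simp [fvRow1_eq]
    | (m'+1) =>
      simp only [List.foldl_cons, List.foldl_nil]
      simp [fvNextRow_eq]

theorem alt_eq_fvec (n : Int) (k : Int) (hn : 0 ≤ n) (hk : 0 ≤ k) (hsm : ¬ 2 * k > n + 1) :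
    C_closed_alt n k = (fvec n.toNat k.toNat : Int) := by
  unfold C_closed_alt
  rw [if_neg (by omega), if_neg hsm]
  simp only []
  rw [foldl_rows]
  exact rowOf_getD _ _ _ (le_refl _)

theorem a_loop_eq_gsum (n : Int) (k : Int) (hn : 0 ≤ n) (hk : 0 ≤ k)
    (hkm : k ≤ PySem.Int.floordiv (n + 1) 2) :
    (PySem.List.pyRange k (PySem.Int.floordiv (n + 1) 2 + 1) 1).foldl
      (fun out j => out + pyComb (n - j + 1) j * pyComb j k) 0
    = (gsum n.toNat k.toNat : Int) := by
  have hM : PySem.Int.floordiv (n + 1) 2 = (((n.toNat + 1) / 2 : Nat) : Int) := by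
    have h1 : n + 1 = ((n.toNat + 1 : Nat) : Int) := by omega
    rw [h1]
    exact_mod_cast PySem.Int.floordiv_natCast (n.toNat + 1) 2
  rw [hM] at hkm ⊢
  rw [PySem.List.pyRange_one, List.foldl_map, PySem.List.foldl_add, zero_add]
  have hL : ((((n.toNat + 1) / 2 : Nat) : Int) + 1 - k).toNat = (n.toNat + 1) / 2 + 1 - k.toNat := by
    omega
  rw [hL]
  -- each loop term is the Nat binomial product, cast to Int
  have hterm : ∀ i : Nat,
      pyComb (n - ((k : Int) + (i : Nat)) + 1) ((k : Int) + (i : Nat)) * pyComb ((k : Int) + (i : Nat)) k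
      = (((n.toNat + 1 - (k.toNat + i)).choose (k.toNat + i) * (k.toNat + i).choose k.toNat : Nat) : Int) := by
    intro i
    unfold pyComb
    have h1 : (n - ((k : Int) + (i : Nat)) + 1).toNat = n.toNat + 1 - (k.toNat + i) := by omega
    have h2 : ((k : Int) + (i : Nat)).toNat = k.toNat + i := by omega
    rw [h1, h2]
    push_cast
    ring
  rw [List.map_congr_left (fun i _ => hterm i)]
  rw [list_sum_range_cast (fun i =>
    (n.toNat + 1 - (k.toNat + i)).choose (k.toNat + i) * (k.toNat + i).choose k.toNat)
    ((n.toNat + 1) / 2 + 1 - k.toNat)]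
  -- restrict gsum's summation range: the dropped terms all vanish
  have hIco : gsum n.toNat k.toNat
      = ∑ j ∈ Finset.Ico k.toNat ((n.toNat + 1) / 2 + 1),
          (n.toNat + 1 - j).choose j * j.choose k.toNat := by
    unfold gsum
    symm
    apply Finset.sum_subset
    · intro j hj
      simp only [Finset.mem_Ico] at hj
      simp only [Finset.mem_range]
      omega
    · intro j hj hnot
      simp only [Finset.mem_range] at hj
      simp only [Finset.mem_Ico, not_and, not_lt] at hnot
      by_cases hjk : j < k.toNat
      · simp [Nat.choose_eq_zero_of_lt hjk]
      · have hge := hnot (by omega)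
        have h2 : n.toNat + 1 - j < j := by omega
        simp [Nat.choose_eq_zero_of_lt h2]
  rw [hIco, Finset.sum_Ico_eq_sum_range]

theorem C_closed_eq (n : Int) (k : Int) : C_closed n k = C_closed_alt n k := by
  by_cases hneg : n < 0 ∨ k < 0
  · unfold C_closed C_closed_alt
    rw [if_pos hneg, if_pos hneg]
  · have hn : 0 ≤ n := by omega
    have hk : 0 ≤ k := by omega
    have hM : PySem.Int.floordiv (n + 1) 2 = (((n.toNat + 1) / 2 : Nat) : Int) := by
      have h1 : n + 1 = ((n.toNat + 1 : Nat) : Int) := by omega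
      rw [h1]
      exact_mod_cast PySem.Int.floordiv_natCast (n.toNat + 1) 2
    unfold C_closed
    rw [if_neg (by omega)]
    by_cases hbig : k > PySem.Int.floordiv (n + 1) 2
    · rw [if_pos hbig]
      unfold C_closed_alt
      rw [if_neg (by omega), if_pos (by rw [hM] at hbig; omega)]
    · rw [if_neg hbig]
      rw [alt_eq_fvec n k hn hk (by rw [hM] at hbig; omega), fvec_eq_gsum]
      exact a_loop_eq_gsum n k hn hk (by omega)

-- ===== VERDICT (by name: the statement is the Claim_ definition above) =====
theorem C_closed_spec : Claim_equal_C_closed := by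
  intro n k _
  unfold Spec_C_closed
  exact C_closed_eq n k
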